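-- pv_equiv track=rewrite | github.com/JaredAppleman/College-Projects | Information Storage and Retrieval Proect/InformationStorageHW2.py | createBigramIndex
-- ===== SOURCE A (Python) =====
-- def createBigramIndex(normalizedWordList):
--     bigramDict = {}
--     for word in normalizedWordList:
--         cashMoney = '$'+word+'$'
--         startIndex = 0
--         endIndex = 2
--         while endIndex <= len(cashMoney):
--             bigram = cashMoney[startIndex:endIndex]
--             startIndex += 1
--             endIndex += 1
--             if bigram in bigramDict:
--                 if not(word in bigramDict[bigram]):
--                     bigramDict[bigram].append(word)
--             else:
--                 bigramDict[bigram] = [word]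
--     return bigramDict
-- ===== SOURCE B (Python) =====
-- def createBigramIndex(normalizedWordList):
--     def bigrams(word):
--         cash = '$' + word + '$'
--         return [cash[i:i + 2] for i in range(len(cash) - 1)]
--     allBigrams = list(dict.fromkeys(b for w in normalizedWordList for b in bigrams(w)))
--     words = list(dict.fromkeys(normalizedWordList))
--     return {b: [w for w in words if b in bigrams(w)] for b in allBigrams}
-- ===== Notes on version B (the rewrite author's own statement) =====
-- stated objective: alternative
-- what changed: B inverts the traversal: instead of A's word-major single pass that grows posting lists in a dict with per-append membership scans, B first computes the ordered-deduped universe of bigrams and of words, then builds each bigram's posting list by a bigram-major scan that filters the word list; no dict is mutated incrementally.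
import Mathlib
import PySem

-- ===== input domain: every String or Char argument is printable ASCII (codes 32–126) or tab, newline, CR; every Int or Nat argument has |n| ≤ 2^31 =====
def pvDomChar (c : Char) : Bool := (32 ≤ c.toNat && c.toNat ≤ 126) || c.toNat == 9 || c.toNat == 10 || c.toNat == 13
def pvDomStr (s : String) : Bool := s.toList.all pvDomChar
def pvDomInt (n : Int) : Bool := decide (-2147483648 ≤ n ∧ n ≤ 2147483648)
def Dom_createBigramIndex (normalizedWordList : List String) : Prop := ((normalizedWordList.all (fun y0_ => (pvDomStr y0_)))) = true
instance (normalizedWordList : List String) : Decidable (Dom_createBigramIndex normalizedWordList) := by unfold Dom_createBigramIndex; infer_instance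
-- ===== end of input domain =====

-- B inverts the traversal: it computes the ordered-deduped bigram universe and word list first,
-- then builds each bigram's posting list by filtering the word list (bigram-major, no incremental dict).

-- ===== PORT A =====
-- one step of A's while-loop body: the if/else on 'bigram in bigramDict'
def stepA (d : PySem.Dict String (List String)) (word bigram : String) :
    PySem.Dict String (List String) :=
  match d.get? bigram with
  | some lst => if word ∈ lst then d else d.insert bigram (lst ++ [word])
  | none => d.insert bigram [word]

-- A's while-loop: 'while endIndex <= len(cashMoney): bigram = cashMoney[startIndex:endIndex]; …'
def loopA (cash : List Char) (word : String) (d : PySem.Dict String (List String))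
    (startIndex endIndex : Nat) : PySem.Dict String (List String) :=
  if endIndex ≤ cash.length then
    let bigram := String.mk (PySem.List.slice cash (some (startIndex : Int)) (some (endIndex : Int)))
    loopA cash word (stepA d word bigram) (startIndex + 1) (endIndex + 1)
  else d
termination_by cash.length + 1 - endIndex

def createBigramIndex (normalizedWordList : List String) : List (String × List String) :=
  (normalizedWordList.foldl (fun d word =>
      let cash : List Char := '$' :: word.toList ++ ['$']   -- '$'+word+'$'
      loopA cash word d 0 2) PySem.Dict.empty).items

-- ===== PORT B =====
-- Source B's helper 'bigrams': the comprehension [cash[i:i+2] for i in range(len(cash)-1)]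
def bigramsB (word : String) : List String :=
  let cash : List Char := '$' :: word.toList ++ ['$']
  (List.range (cash.length - 1)).map
    (fun (i : Nat) => String.mk (PySem.List.slice cash (some (i : Int)) (some ((i : Int) + 2))))

def createBigramIndex_alt (normalizedWordList : List String) : List (String × List String) :=
  let allBigrams := PySem.List.dedup (normalizedWordList.flatMap bigramsB)
  let words := PySem.List.dedup normalizedWordList
  allBigrams.map (fun b => (b, words.filter (fun w => decide (b ∈ bigramsB w))))

-- ===== PRECONDITION & SPEC =====
def Spec_createBigramIndex (normalizedWordList : List String) (out : List (String × List String)) : Prop := out = createBigramIndex_alt normalizedWordList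
instance (normalizedWordList : List String) (out : List (String × List String)) : Decidable (Spec_createBigramIndex normalizedWordList out) := by unfold Spec_createBigramIndex; infer_instance

-- ===== CLAIM (what is proved, stated in full; the proofs are below) =====
def Claim_equal_createBigramIndex : Prop := ∀ (normalizedWordList : List String), Dom_createBigramIndex normalizedWordList → Spec_createBigramIndex normalizedWordList (createBigramIndex normalizedWordList)

-- ===== LEMMAS AND PROOFS =====

-- B's setdefault/append step, used as the midpoint between the two programs
def stepB (d : PySem.Dict String (List String)) (word bigram : String) :
    PySem.Dict String (List String) :=
  d.modify bigram [] (· ++ [word])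

-- the (bigram, word) pairs that the double fold over (dedup W, dedup (bigrams w)) walks through
def pairsOf (ws : List String) : List (String × String) :=
  ws.flatMap (fun w => (PySem.List.dedup (bigramsB w)).map (fun b => (b, w)))

-- ordered dedup peels its head and filters later copies
theorem foldl_add_cons (b : String) : ∀ (rest s : List String),
    List.foldl PySem.Set.add (b :: s) rest
      = b :: List.foldl PySem.Set.add s (rest.filter (fun x => x ≠ b)) := by
  intro rest
  induction rest with
  | nil => intro s; simp
  | cons x rest ih =>
    intro s
    by_cases hxb : x = b
    · rw [List.filter_cons_of_neg (by simp [hxb])]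
      simp only [List.foldl_cons]
      have : PySem.Set.add (b :: s) x = b :: s := by
        simp [PySem.Set.add, PySem.Set.contains, hxb]
      rw [this, ih]
    · rw [List.filter_cons_of_pos (by simp [hxb])]
      simp only [List.foldl_cons]
      have hadd : PySem.Set.add (b :: s) x = b :: PySem.Set.add s x := by
        simp only [PySem.Set.add, PySem.Set.contains, List.contains_eq_mem, List.mem_cons,
          decide_eq_true_eq]
        by_cases hxs : x ∈ s <;> simp [hxs, hxb]
      rw [hadd, ih]

theorem dedup_cons (b : String) (rest : List String) :
    PySem.List.dedup (b :: rest) = b :: PySem.List.dedup (rest.filter (fun x => x ≠ b)) := by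
  have h1 : PySem.List.dedup (b :: rest) = List.foldl PySem.Set.add [] (b :: rest) :=
    PySem.Set.ofList_eq_foldl _
  have h2 : PySem.List.dedup (rest.filter (fun x => x ≠ b))
      = List.foldl PySem.Set.add [] (rest.filter (fun x => x ≠ b)) :=
    PySem.Set.ofList_eq_foldl _
  rw [h1, h2]
  simp only [List.foldl_cons]
  have : PySem.Set.add ([] : List String) b = [b] := by simp [PySem.Set.add, PySem.Set.contains]
  rw [this]
  exact foldl_add_cons b rest []

-- stepA touches only the key it is given
theorem stepA_get?_of_ne (d : PySem.Dict String (List String)) (w b b' : String) (h : b' ≠ b) :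
    (stepA d w b).get? b' = d.get? b' := by
  unfold stepA
  cases hg : d.get? b with
  | none => simp [PySem.Dict.get?_insert_of_ne _ _ h]
  | some lst =>
    by_cases hw : w ∈ lst <;> simp [hw, PySem.Dict.get?_insert_of_ne _ _ h]

theorem stepA_getD_of_ne (d : PySem.Dict String (List String)) (w b b' : String) (h : b' ≠ b) :
    (stepA d w b).getD b' [] = d.getD b' [] := by
  simp [PySem.Dict.getD, stepA_get?_of_ne d w b b' h]

-- first encounter of w at key b: A's guarded append is B's unconditional append
theorem stepA_eq_stepB (d : PySem.Dict String (List String)) (w b : String)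
    (h : w ∉ d.getD b []) : stepA d w b = stepB d w b := by
  unfold stepA stepB PySem.Dict.modify
  cases hg : d.get? b with
  | none => simp [PySem.Dict.getD, hg]
  | some lst =>
    have hw : w ∉ lst := by simpa [PySem.Dict.getD, hg] using h
    simp [PySem.Dict.getD, hg, hw]

-- after stepA d w b, w is recorded at key b
theorem stepA_post (d : PySem.Dict String (List String)) (w b : String) :
    ∃ v, (stepA d w b).get? b = some v ∧ w ∈ v := by
  unfold stepA
  cases hg : d.get? b with
  | none => exact ⟨[w], by simp [PySem.Dict.get?_insert_self], by simp⟩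
  | some lst =>
    by_cases hw : w ∈ lst
    · exact ⟨lst, by simp [hw, hg], hw⟩
    · exact ⟨lst ++ [w], by simp [hw, PySem.Dict.get?_insert_self], by simp⟩

-- any stepA preserves 'w recorded at key b'
theorem stepA_mono (d : PySem.Dict String (List String)) (u b' w b : String)
    (h : ∃ v, d.get? b = some v ∧ w ∈ v) :
    ∃ v, (stepA d u b').get? b = some v ∧ w ∈ v := by
  obtain ⟨v, hv, hwv⟩ := h
  by_cases hbb : b = b'
  · subst hbb
    unfold stepA
    rw [hv]
    by_cases hu : u ∈ v
    · exact ⟨v, by simp [hu, hv], hwv⟩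
    · exact ⟨v ++ [u], by simp [hu, PySem.Dict.get?_insert_self], by simp [hwv]⟩
  · rw [stepA_get?_of_ne d u b' b hbb]
    exact ⟨v, hv, hwv⟩

-- if w is already recorded at b, stepA on b is a no-op
theorem stepA_skip (d : PySem.Dict String (List String)) (w b : String)
    (h : ∃ v, d.get? b = some v ∧ w ∈ v) : stepA d w b = d := by
  obtain ⟨v, hv, hwv⟩ := h
  unfold stepA
  rw [hv]
  simp [hwv]

theorem foldl_stepA_mono (u w b : String) : ∀ (L : List String) (d : PySem.Dict String (List String)),
    (∃ v, d.get? b = some v ∧ w ∈ v) →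
    ∃ v, (L.foldl (fun d b' => stepA d u b') d).get? b = some v ∧ w ∈ v := by
  intro L
  induction L with
  | nil => intro d h; exact h
  | cons x L ih => intro d h; exact ih _ (stepA_mono d u x w b h)

-- after A's inner loop, w is recorded at every bigram of the loop's list
theorem foldl_stepA_post (w : String) : ∀ (L : List String) (d : PySem.Dict String (List String)),
    ∀ b ∈ L, ∃ v, (L.foldl (fun d b' => stepA d w b') d).get? b = some v ∧ w ∈ v := by
  intro L
  induction L with
  | nil => intro d b hb; simp at hb
  | cons x L ih =>
    intro d b hb
    rcases List.mem_cons.mp hb with h | h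
    · subst h
      exact foldl_stepA_mono w w b L _ (stepA_post d w b)
    · exact ih _ b h

-- the inner loop only ever adds the current word to posting lists
theorem foldl_stepA_values (w : String) : ∀ (L : List String) (d : PySem.Dict String (List String))
    (b : String) (v : List String), (L.foldl (fun d b' => stepA d w b') d).get? b = some v →
    ∀ u ∈ v, (∃ v0, d.get? b = some v0 ∧ u ∈ v0) ∨ u = w := by
  intro L
  induction L with
  | nil => intro d b v hv u hu; exact Or.inl ⟨v, hv, hu⟩
  | cons x L ih =>
    intro d b v hv u hu
    rcases ih _ b v hv u hu with ⟨v0, hv0, huv0⟩ | h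
    · by_cases hbx : b = x
      · subst hbx
        simp only [stepA] at hv0
        cases hg : d.get? b with
        | none =>
          rw [hg] at hv0
          rw [PySem.Dict.get?_insert_self] at hv0
          have : v0 = [w] := (Option.some.inj hv0).symm
          subst this
          right; simpa using huv0
        | some lst =>
          rw [hg] at hv0
          by_cases hw : w ∈ lst
          · simp only [if_pos hw] at hv0
            rw [hg] at hv0
            exact Or.inl ⟨v0, hv0, huv0⟩
          · simp only [if_neg hw, PySem.Dict.get?_insert_self] at hv0
            have : v0 = lst ++ [w] := (Option.some.inj hv0).symm
            subst this
            rcases List.mem_append.mp huv0 with h1 | h1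
            · exact Or.inl ⟨lst, rfl, h1⟩
            · right; simpa using h1
      · rw [stepA_get?_of_ne d w x b hbx] at hv0
        exact Or.inl ⟨v0, hv0, huv0⟩
    · exact Or.inr h

-- repeated bigrams within one word are no-ops for A
theorem foldl_stepA_filter (w b : String) : ∀ (L : List String) (d : PySem.Dict String (List String)),
    (∃ v, d.get? b = some v ∧ w ∈ v) →
    L.foldl (fun d b' => stepA d w b') d
      = (L.filter (fun x => x ≠ b)).foldl (fun d b' => stepA d w b') d := by
  intro L
  induction L with
  | nil => intro d h; rfl
  | cons x L ih =>
    intro d h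
    by_cases hxb : x = b
    · rw [List.filter_cons_of_neg (by simp [hxb])]
      simp only [List.foldl_cons]
      rw [hxb, stepA_skip d w b h]
      exact ih d h
    · rw [List.filter_cons_of_pos (by simp [hxb])]
      simp only [List.foldl_cons]
      exact ih _ (stepA_mono d w x w b h)

-- inner equivalence: A's guarded loop over L = the unguarded loop over dedup L, for a fresh word
theorem inner_eq (w : String) : ∀ (n : Nat) (L : List String), L.length ≤ n →
    ∀ (d : PySem.Dict String (List String)), (∀ b ∈ L, w ∉ d.getD b []) →
    L.foldl (fun d b => stepA d w b) d
      = (PySem.List.dedup L).foldl (fun d b => stepB d w b) d := by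
  intro n
  induction n with
  | zero =>
    intro L hL d _
    have : L = [] := List.length_eq_zero_iff.mp (Nat.le_zero.mp hL)
    subst this
    simp [PySem.List.dedup, PySem.Set.ofList]
  | succ n ih =>
    intro L hL d hfresh
    cases L with
    | nil => simp [PySem.List.dedup, PySem.Set.ofList]
    | cons b rest =>
      rw [dedup_cons]
      simp only [List.foldl_cons]
      rw [← stepA_eq_stepB d w b (hfresh b (by simp))]
      have hpost : ∃ v, (stepA d w b).get? b = some v ∧ w ∈ v := stepA_post d w b
      rw [foldl_stepA_filter w b rest (stepA d w b) hpost]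
      apply ih
      · calc (rest.filter (fun x => x ≠ b)).length ≤ rest.length := List.length_filter_le _ _
          _ ≤ n := by simpa using hL
      · intro b' hb'
        have hne : b' ≠ b := by
          have := List.of_mem_filter hb'
          simpa using this
        rw [stepA_getD_of_ne d w b b' hne]
        exact hfresh b' (List.mem_cons_of_mem _ (List.mem_of_mem_filter hb'))

-- a word all of whose bigrams already carry it is a no-op for A's inner loop
theorem innerA_noop (w : String) : ∀ (L : List String) (d : PySem.Dict String (List String)),
    (∀ b ∈ L, ∃ v, d.get? b = some v ∧ w ∈ v) →
    L.foldl (fun d b => stepA d w b) d = d := by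
  intro L
  induction L with
  | nil => intro d _; rfl
  | cons b rest ih =>
    intro d h
    simp only [List.foldl_cons]
    rw [stepA_skip d w b (h b (by simp))]
    exact ih d (fun b' hb' => h b' (List.mem_cons_of_mem _ hb'))

-- duplicate words are no-ops for A's outer loop
theorem outer_filter (w : String) : ∀ (rest : List String) (d : PySem.Dict String (List String)),
    (∀ b ∈ bigramsB w, ∃ v, d.get? b = some v ∧ w ∈ v) →
    rest.foldl (fun d u => (bigramsB u).foldl (fun d b => stepA d u b) d) d
      = (rest.filter (fun x => x ≠ w)).foldl
          (fun d u => (bigramsB u).foldl (fun d b => stepA d u b) d) d := by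
  intro rest
  induction rest with
  | nil => intro d _; rfl
  | cons x rest ih =>
    intro d h
    by_cases hxw : x = w
    · subst hxw
      rw [List.filter_cons_of_neg (by simp)]
      simp only [List.foldl_cons]
      rw [innerA_noop x (bigramsB x) d h]
      exact ih d h
    · rw [List.filter_cons_of_pos (by simp [hxw])]
      simp only [List.foldl_cons]
      apply ih
      intro b hb
      exact foldl_stepA_mono x w b (bigramsB x) d (h b hb)

-- outer equivalence: A's outer loop = the stepB double fold over the deduped word list
theorem outer_eq : ∀ (n : Nat) (W : List String), W.length ≤ n →
    ∀ (d : PySem.Dict String (List String)) (seen : List String),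
    (∀ b v, d.get? b = some v → ∀ u ∈ v, u ∈ seen) →
    (∀ u ∈ W, u ∉ seen) →
    W.foldl (fun d w => (bigramsB w).foldl (fun d b => stepA d w b) d) d
      = (PySem.List.dedup W).foldl
          (fun d w => (PySem.List.dedup (bigramsB w)).foldl (fun d b => stepB d w b) d) d := by
  intro n
  induction n with
  | zero =>
    intro W hW d seen _ _
    have : W = [] := List.length_eq_zero_iff.mp (Nat.le_zero.mp hW)
    subst this
    simp [PySem.List.dedup, PySem.Set.ofList]
  | succ n ih =>
    intro W hW d seen hval hfresh
    cases W with
    | nil => simp [PySem.List.dedup, PySem.Set.ofList]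
    | cons w rest =>
      rw [dedup_cons]
      simp only [List.foldl_cons]
      have hwfresh : ∀ b ∈ bigramsB w, w ∉ d.getD b [] := by
        intro b _
        cases hg : d.get? b with
        | none => simp [PySem.Dict.getD, hg]
        | some v =>
          simp only [PySem.Dict.getD, hg, Option.getD_some]
          intro hwv
          exact hfresh w (by simp) (hval b v hg w hwv)
      rw [← inner_eq w (bigramsB w).length (bigramsB w) le_rfl d hwfresh]
      set d1 := (bigramsB w).foldl (fun d b => stepA d w b) d with hd1
      have hpost : ∀ b ∈ bigramsB w, ∃ v, d1.get? b = some v ∧ w ∈ v :=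
        foldl_stepA_post w (bigramsB w) d
      rw [outer_filter w rest d1 hpost]
      apply ih _ (by calc (rest.filter (fun x => x ≠ w)).length ≤ rest.length :=
            List.length_filter_le _ _
          _ ≤ n := by simpa using hW) d1 (seen ++ [w])
      · intro b v hv u hu
        rcases foldl_stepA_values w (bigramsB w) d b v hv u hu with ⟨v0, hv0, huv0⟩ | h
        · exact List.mem_append_left _ (hval b v0 hv0 u huv0)
        · subst h; simp
      · intro u hu
        have h1 : u ≠ w := by
          have := List.of_mem_filter hu
          simpa using this
        have h2 : u ∉ seen := hfresh u (List.mem_cons_of_mem _ (List.mem_of_mem_filter hu))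
        simp [h1, h2]

-- A's while-loop, started at window [s, s+2), is the fold of stepA over the remaining bigrams
theorem loopA_eq (cash : List Char) (w : String) : ∀ (n s : Nat) (d : PySem.Dict String (List String)),
    cash.length + 1 - (s + 2) ≤ n →
    loopA cash w d s (s + 2)
      = ((List.range' s (cash.length - 1 - s)).map
          (fun i => String.mk ((cash.drop i).take 2))).foldl (fun d b => stepA d w b) d := by
  intro n
  induction n with
  | zero =>
    intro s d hn
    have hgt : ¬ (s + 2 ≤ cash.length) := by omega
    rw [loopA]
    rw [if_neg hgt]
    have : cash.length - 1 - s = 0 := by omega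
    rw [this]
    rfl
  | succ n ih =>
    intro s d hn
    by_cases hle : s + 2 ≤ cash.length
    · rw [loopA, if_pos hle]
      have hslice : PySem.List.slice cash (some (s : Int)) (some ((s + 2 : Nat) : Int))
          = (cash.drop s).take 2 := by
        push_cast
        exact PySem.List.slice_natCast_add cash s 2
      have hcnt : cash.length - 1 - s = (cash.length - 1 - (s + 1)) + 1 := by omega
      rw [hcnt, List.range'_succ, List.map_cons, List.foldl_cons]
      have := ih (s + 1) (stepA d w (String.mk ((cash.drop s).take 2))) (by omega)
      simp only [hslice]
      exact this
    · rw [loopA, if_neg hle]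
      have : cash.length - 1 - s = 0 := by omega
      rw [this]
      rfl

-- B's bigram list is exactly the window list A's loop walks through
theorem bigramsB_eq (w : String) :
    bigramsB w = (List.range' 0 (('$' :: w.toList ++ ['$']).length - 1)).map
      (fun i => String.mk ((('$' :: w.toList ++ ['$']).drop i).take 2)) := by
  rw [show bigramsB w = (List.range (('$' :: w.toList ++ ['$']).length - 1)).map
      (fun (i : Nat) => String.mk (PySem.List.slice ('$' :: w.toList ++ ['$'])
        (some (i : Int)) (some ((i : Int) + 2)))) from rfl]
  rw [List.range_eq_range']
  refine List.map_congr_left (fun i _ => ?_)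
  congr 1
  have : ((i : Int) + 2) = (((i + 2 : Nat)) : Int) := by push_cast; ring
  rw [this]
  push_cast
  exact PySem.List.slice_natCast_add _ i 2

-- ===== second leg: the stepB double fold's items are B's map/filter form =====

-- the double fold is the pair fold over pairsOf
theorem foldl_pairs : ∀ (ws : List String) (d : PySem.Dict String (List String)),
    ws.foldl (fun d w => (PySem.List.dedup (bigramsB w)).foldl (fun d b => stepB d w b) d) d
      = (pairsOf ws).foldl (fun d p => d.modify p.1 [] (· ++ [p.2])) d := by
  intro ws
  induction ws with
  | nil => intro d; rfl
  | cons w ws ih =>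
    intro d
    simp only [pairsOf, List.flatMap_cons, List.foldl_append, List.foldl_cons, List.foldl_map]
    rw [ih]
    rfl

-- a nodup list filtered to one value
theorem nodup_filter_eq (c : String) : ∀ (l : List String), l.Nodup →
    l.filter (fun x => x == c) = if c ∈ l then [c] else [] := by
  intro l
  induction l with
  | nil => intro _; simp
  | cons x l ih =>
    intro h
    rcases List.nodup_cons.mp h with ⟨hx, hl⟩
    by_cases hxc : x = c
    · subst hxc
      rw [List.filter_cons_of_pos (by simp)]
      rw [ih hl, if_neg hx]
      simp
    · rw [List.filter_cons_of_neg (by simp [hxc])]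
      rw [ih hl]
      by_cases hc : c ∈ l <;> simp [hc, Ne.symm hxc]

-- the words paired with bigram c among pairsOf ws are exactly the words of ws containing c
theorem pairs_filter_eq (c : String) : ∀ (ws : List String),
    ((pairsOf ws).filter (fun p => p.1 == c)).map (·.2)
      = ws.filter (fun w => decide (c ∈ bigramsB w)) := by
  intro ws
  induction ws with
  | nil => rfl
  | cons w ws ih =>
    simp only [pairsOf, List.flatMap_cons, List.filter_append, List.map_append]
    rw [show (pairsOf ws) = ws.flatMap (fun w => (PySem.List.dedup (bigramsB w)).map
        (fun b => (b, w))) from rfl] at ih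
    rw [ih, List.filter_map]
    have hpiece : (PySem.List.dedup (bigramsB w)).filter
        ((fun p : String × String => p.1 == c) ∘ (fun b => (b, w)))
        = if c ∈ bigramsB w then [c] else [] := by
      rw [show ((fun p : String × String => p.1 == c) ∘ (fun b => (b, w)))
          = (fun x => x == c) from rfl]
      rw [nodup_filter_eq c _ (PySem.List.nodup_dedup _)]
      simp
    rw [hpiece, List.filter_cons]
    by_cases hc : c ∈ bigramsB w <;> simp [hc]

-- items of a dict with nodup keys, as a map over its keys
theorem items_eq_map_keys (d : PySem.Dict String (List String)) (h : d.keys.Nodup) :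
    d.items = d.keys.map (fun k => (k, d.getD k [])) := by
  simp only [PySem.Dict.keys, List.map_map]
  conv_lhs => rw [← List.map_id d.items]
  refine List.map_congr_left (fun p hp => ?_)
  have h2 : d.getD p.1 [] = p.2 := PySem.Dict.getD_of_mem_items d (by simpa using hp) h []
  simp [h2]

-- Set.update over a flatMap is the word-by-word fold of updates
theorem update_flatMap (f : String → List String) : ∀ (ws : List String) (s : List String),
    PySem.Set.update s (ws.flatMap f) = ws.foldl (fun s w => PySem.Set.update s (f w)) s := by
  intro ws
  induction ws with
  | nil => intro s; rfl
  | cons w ws ih =>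
    intro s
    simp only [List.flatMap_cons, PySem.Set.update_append, List.foldl_cons]
    exact ih _

-- updating with dedup l is updating with l
theorem update_dedup (s l : List String) :
    PySem.Set.update s (PySem.List.dedup l) = PySem.Set.update s l := by
  rw [PySem.Set.update_eq_append_filter, PySem.Set.update_eq_append_filter]
  rw [show PySem.List.dedup l = PySem.Set.ofList l from PySem.List.dedup_eq_ofList l]
  rw [PySem.Set.ofList_ofList]

-- updating with a list all of whose elements are present is a no-op
theorem update_noop (s l : List String) (h : ∀ x ∈ l, x ∈ s) :
    PySem.Set.update s l = s := by
  rw [PySem.Set.update_eq_append_filter]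
  have hnil : (PySem.Set.ofList l).filter (fun y => !(PySem.Set.contains s y)) = [] := by
    rw [List.filter_eq_nil_iff]
    intro y hy
    have hys : y ∈ s := h y ((PySem.Set.mem_ofList l y).mp hy)
    simp [hys]
  rw [hnil, List.append_nil]

-- dropping repetitions of word w from the update fold is a no-op once f w ⊆ s
theorem update_fold_filter (f : String → List String) (w : String) :
    ∀ (rest : List String) (s : List String), (∀ x ∈ f w, x ∈ s) →
    (rest.filter (fun x => x ≠ w)).foldl (fun s u => PySem.Set.update s (f u)) s
      = rest.foldl (fun s u => PySem.Set.update s (f u)) s := by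
  intro rest
  induction rest with
  | nil => intro s _; rfl
  | cons x rest ih =>
    intro s h
    by_cases hxw : x = w
    · subst hxw
      rw [List.filter_cons_of_neg (by simp)]
      rw [List.foldl_cons, update_noop s (f x) h]
      exact ih s h
    · rw [List.filter_cons_of_pos (by simp [hxw]), List.foldl_cons, List.foldl_cons]
      exact ih _ (fun z hz => (PySem.Set.mem_update s (f x) z).mpr (Or.inl (h z hz)))

-- the update fold over dedup ws equals the fold over ws
theorem update_fold_dedup (f : String → List String) : ∀ (n : Nat) (ws : List String),
    ws.length ≤ n → ∀ (s : List String),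
    (PySem.List.dedup ws).foldl (fun s u => PySem.Set.update s (f u)) s
      = ws.foldl (fun s u => PySem.Set.update s (f u)) s := by
  intro n
  induction n with
  | zero =>
    intro ws hws s
    have : ws = [] := List.length_eq_zero_iff.mp (Nat.le_zero.mp hws)
    subst this
    rfl
  | succ n ih =>
    intro ws hws s
    cases ws with
    | nil => rfl
    | cons w rest =>
      rw [dedup_cons]
      simp only [List.foldl_cons]
      rw [ih _ (by calc (rest.filter (fun x => x ≠ w)).length ≤ rest.length :=
            List.length_filter_le _ _
          _ ≤ n := by simpa using hws)]
      exact update_fold_filter f w rest _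
        (fun x hx => (PySem.Set.mem_update s (f w) x).mpr (Or.inr hx))

-- the keys walked by pairsOf (dedup W) dedup to B's bigram universe
theorem keys_pairs_eq (W : List String) :
    PySem.List.dedup ((pairsOf (PySem.List.dedup W)).map (·.1))
      = PySem.List.dedup (W.flatMap bigramsB) := by
  have hmap : (pairsOf (PySem.List.dedup W)).map (·.1)
      = (PySem.List.dedup W).flatMap (fun w => PySem.List.dedup (bigramsB w)) := by
    simp [pairsOf, List.map_flatMap, List.map_map, Function.comp_def]
  have h1 : ∀ (ws s : List String),
      ws.foldl (fun s w => PySem.Set.update s (PySem.List.dedup (bigramsB w))) s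
        = ws.foldl (fun s w => PySem.Set.update s (bigramsB w)) s := by
    intro ws s
    simp only [update_dedup]
  have e1 : PySem.List.dedup
        ((PySem.List.dedup W).flatMap (fun w => PySem.List.dedup (bigramsB w)))
      = (PySem.List.dedup W).foldl
          (fun s w => PySem.Set.update s (PySem.List.dedup (bigramsB w))) [] := by
    rw [PySem.List.dedup_eq_ofList
        ((PySem.List.dedup W).flatMap (fun w => PySem.List.dedup (bigramsB w)))]
    rw [← PySem.Set.update_nil_left
        ((PySem.List.dedup W).flatMap (fun w => PySem.List.dedup (bigramsB w)))]
    exact update_flatMap _ _ _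
  have e2 : PySem.List.dedup (W.flatMap bigramsB)
      = W.foldl (fun s w => PySem.Set.update s (bigramsB w)) [] := by
    rw [PySem.List.dedup_eq_ofList (W.flatMap bigramsB)]
    rw [← PySem.Set.update_nil_left (W.flatMap bigramsB)]
    exact update_flatMap _ _ _
  rw [hmap, e1, h1, e2]
  exact update_fold_dedup bigramsB W.length W le_rfl []

-- ===== VERDICT (by name: the statement is the Claim_ definition above) =====
theorem createBigramIndex_spec : Claim_equal_createBigramIndex := by
  intro W _
  unfold Spec_createBigramIndex createBigramIndex createBigramIndex_alt
  -- leg 1: A's fold = the stepB double fold over the deduped word list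
  have hfun : (fun (d : PySem.Dict String (List String)) word =>
      let cash : List Char := '$' :: word.toList ++ ['$']
      loopA cash word d 0 2)
      = (fun d word => (bigramsB word).foldl (fun d b => stepA d word b) d) := by
    funext d word
    show loopA ('$' :: word.toList ++ ['$']) word d 0 (0 + 2) = _
    rw [loopA_eq ('$' :: word.toList ++ ['$']) word
        (('$' :: word.toList ++ ['$']).length + 1 - (0 + 2)) 0 d le_rfl]
    rw [bigramsB_eq]
    simp
  rw [hfun]
  rw [outer_eq W.length W le_rfl PySem.Dict.empty []
    (fun b v hv => by simp [PySem.Dict.get?_empty] at hv) (fun u _ => by simp)]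
  -- leg 2: the double fold's items are B's map/filter form
  rw [foldl_pairs]
  set P := pairsOf (PySem.List.dedup W) with hP
  set D := P.foldl (fun d p => d.modify p.1 [] (· ++ [p.2])) PySem.Dict.empty with hD
  have hkeysnodup : D.keys.Nodup :=
    PySem.Dict.nodup_keys_foldl_modify_key P (·.1) [] (fun _ p v => v ++ [p.2])
      PySem.Dict.empty PySem.Dict.nodup_keys_empty
  have hkeys : D.keys = PySem.List.dedup (W.flatMap bigramsB) := by
    have hk : D.keys = PySem.Set.update PySem.Dict.empty.keys (P.map (·.1)) :=
      PySem.Dict.keys_foldl_modify_key P (·.1) [] (fun _ p v => v ++ [p.2]) PySem.Dict.empty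
    rw [hk, show (PySem.Dict.empty : PySem.Dict String (List String)).keys = ([] : List String)
        from PySem.Dict.keys_empty]
    rw [PySem.Set.update_nil_left, ← PySem.List.dedup_eq_ofList]
    exact keys_pairs_eq W
  have hgetD : ∀ c, D.getD c [] = (PySem.List.dedup W).filter
      (fun w => decide (c ∈ bigramsB w)) := by
    intro c
    have hg : D.getD c [] = PySem.Dict.empty.getD c []
        ++ (P.filter (fun p => p.1 == c)).map (·.2) :=
      PySem.Dict.getD_foldl_modify_append P PySem.Dict.empty c
    rw [hg, show (PySem.Dict.empty : PySem.Dict String (List String)).getD c [] = []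
        from PySem.Dict.getD_empty c [], List.nil_append]
    exact pairs_filter_eq c (PySem.List.dedup W)
  rw [items_eq_map_keys D hkeysnodup, hkeys]
  exact List.map_congr_left (fun b _ => by rw [hgetD b])
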